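-- pv_equiv track=rewrite | github.com/akshaypatra/DSA_Algos | LeetCode/Array /prefix sum/Q2381. Shifting Letters II.py | shiftingLetters
-- ===== SOURCE A (Python) =====
-- from typing import List
--
-- def shiftingLetters(s: str, shifts: List[List[int]]) -> str:
--
--     '''
--     # Bruteforce solution
--     # time limit exceeded
--
--     array=list(s)
--
--     for i,j,k in shifts:
--         for n in range(i,j+1):
--             if k==0:
--                 m=ord(array[n])
--                 if m==97:
--                     m=123
--                 m-=1
--                 array[n]=chr(m)
--             else:
--                 m=ord(array[n])
--                 if m==122:
--                     m=96
--                 m+=1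
--                 array[n]=chr(m)
--     return "".join(array)
--
--     '''
--
--     # Solution using Prefix Sum
--
--     '''
--     -> calculate all the  changes in the array in a dummy array (containing only changes )
--     -> apply the final changes in the actual array at the end
--     -> iterating from right to left
--
--     complexity : O(n)
--
--     '''
--
--     prefix_diff = [0]*(len(s)+1)
--
--     for left,right,d in shifts:
--         prefix_diff[right+1] += 1 if d else -1
--         prefix_diff[left] += -1 if d else 1
--
--     diff = 0
--     res = [ord(c) - ord("a") for c in s ]
--
--     for i in reversed(range(len(prefix_diff))):
--         diff += prefix_diff[i]
--
--         res[i-1]=(diff + res[i-1])% 26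
--
--     s = [chr(ord("a") + n) for n in res ]
--     return "".join(s)
-- ===== SOURCE B (Python) =====
-- def shiftingLetters(s, shifts):
--     codes = [(ord(c) - ord("a")) % 26 for c in s]
--     for left, right, d in shifts:
--         step = 1 if d else -1
--         for n in range(left, right + 1):
--             codes[n] = (codes[n] + step) % 26
--     return "".join(chr(ord("a") + c) for c in codes)
-- ===== Notes on version B (the rewrite author's own statement) =====
-- stated objective: alternative
-- what changed: B drops A's difference array and right-to-left suffix sweep and instead applies each shift operation directly to every character of its range with mod-26 arithmetic.
-- outside the precondition, e.g. on shiftingLetters('abc', [[2, 0, 1]]): A returns 'aac', B returns 'abc'; on shiftingLetters('ab', [[-2, -1, 1]]): A returns 'zb', B returns 'bc'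
import Mathlib
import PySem

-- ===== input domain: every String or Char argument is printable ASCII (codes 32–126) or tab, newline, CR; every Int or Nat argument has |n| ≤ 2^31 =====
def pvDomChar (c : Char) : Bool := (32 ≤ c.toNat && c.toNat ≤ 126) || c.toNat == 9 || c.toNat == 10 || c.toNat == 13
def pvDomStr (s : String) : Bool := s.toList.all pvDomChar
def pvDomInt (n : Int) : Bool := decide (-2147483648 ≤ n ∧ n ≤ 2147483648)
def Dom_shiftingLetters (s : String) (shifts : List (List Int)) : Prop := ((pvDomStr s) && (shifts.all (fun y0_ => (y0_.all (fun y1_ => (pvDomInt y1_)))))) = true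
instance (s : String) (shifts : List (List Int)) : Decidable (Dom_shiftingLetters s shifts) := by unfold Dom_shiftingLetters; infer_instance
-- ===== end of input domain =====

-- B replaces A's difference-array-and-suffix-sweep by directly applying each shift, mod 26, to every character of its range (objective: alternative decomposition, not faster).

-- ===== PORT A =====
-- 'for i in reversed(range(len(prefix_diff)))' with the running 'diff' and the write 'res[i-1] = (diff + res[i-1]) % 26':
-- counter t+1 processes Python index i = t, counting down to 0; index i-1 (= -1 at i=0) uses Python negative-index semantics via pySetD/pyGetD.
def aLoop2 (pd : List Int) : Nat → Int → List Int → Int × List Int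
  | 0, diff, res => (diff, res)
  | t+1, diff, res =>
      let diff' := diff + PySem.List.pyGetD pd (t : Int) 0
      let res' := PySem.List.pySetD res ((t : Int) - 1)
        (PySem.Int.mod (diff' + PySem.List.pyGetD res ((t : Int) - 1) 0) 26)
      aLoop2 pd t diff' res'

-- body of A's first loop 'for left,right,d in shifts': two read-modify-write updates of the difference array.
-- exact where the Python indices are in range (guaranteed by Pre_); on an unpacking error Python raises, here the row is skipped
def aStep (pd : List Int) (row : List Int) : List Int :=
  match row with
  | [left, right, d] =>
      let pd1 := PySem.List.pySetD pd (right + 1)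
        (PySem.List.pyGetD pd (right + 1) 0 + (if d = 0 then (-1 : Int) else 1))
      PySem.List.pySetD pd1 left
        (PySem.List.pyGetD pd1 left 0 + (if d = 0 then (1 : Int) else -1))
  | _ => pd

def shiftingLetters (s : String) (shifts : List (List Int)) : String :=
  let cs := s.toList
  let n := cs.length
  let pd0 : List Int := List.replicate (n + 1) 0
  let pd := shifts.foldl aStep pd0
  let res0 : List Int := cs.map (fun c => (c.toNat : Int) - 97)
  let fin := aLoop2 pd (n + 1) 0 res0
  String.ofList (fin.2.map (fun x => Char.ofNat (97 + x).toNat))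

-- ===== PORT B =====
-- body of B's outer loop 'for left,right,d in shifts': apply the ±1 shift mod 26 to every index in range(left, right+1).
-- exact where the Python indices are in range (guaranteed by Pre_); on an unpacking error Python raises, here the row is skipped
def bStep (codes : List Int) (row : List Int) : List Int :=
  match row with
  | [left, right, d] =>
      let step : Int := if d = 0 then -1 else 1
      (PySem.List.pyRange left (right + 1) 1).foldl (fun codes n =>
        PySem.List.pySetD codes n (PySem.Int.mod (PySem.List.pyGetD codes n 0 + step) 26)) codes
  | _ => codes

def shiftingLetters_alt (s : String) (shifts : List (List Int)) : String :=
  let codes0 : List Int := s.toList.map (fun c => PySem.Int.mod ((c.toNat : Int) - 97) 26)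
  let codes := shifts.foldl bStep codes0
  String.ofList (codes.map (fun x => Char.ofNat (97 + x).toNat))

-- ===== PRECONDITION & SPEC =====
def rowOk (n : Nat) (row : List Int) : Bool :=
  match row with
  | [l, r, _] => decide (0 ≤ l ∧ l ≤ r ∧ r < (n : Int))
  | _ => false

-- Pre_ restricts to the problem's natural domain (non-empty s, each shift a [left,right,d] triple with 0 ≤ left ≤ right < len(s)):
-- outside it A raises IndexError/ValueError, or returns a value produced by negative-index wraparound / a reversed range in its
-- difference array, which is accidental (see the cited excluded examples).
def Pre_shiftingLetters (s : String) (shifts : List (List Int)) : Prop :=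
  s.toList ≠ [] ∧ ∀ row ∈ shifts, rowOk s.toList.length row = true
instance (s : String) (shifts : List (List Int)) : Decidable (Pre_shiftingLetters s shifts) := by unfold Pre_shiftingLetters; infer_instance

def pvWitness_shiftingLetters : String × List (List Int) := ("ab", [[0, 1, 1]])

def Spec_shiftingLetters (s : String) (shifts : List (List Int)) (out : String) : Prop := out = shiftingLetters_alt s shifts
instance (s : String) (shifts : List (List Int)) (out : String) : Decidable (Spec_shiftingLetters s shifts out) := by unfold Spec_shiftingLetters; infer_instance

-- ===== CLAIM (what is proved, stated in full; the proofs are below) =====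
def Claim_equal_shiftingLetters : Prop := ∀ (s : String) (shifts : List (List Int)), Dom_shiftingLetters s shifts → Pre_shiftingLetters s shifts → Spec_shiftingLetters s shifts (shiftingLetters s shifts)

-- ===== LEMMAS AND PROOFS =====

-- net shift of position p over the operations (what B accumulates)
def rowS (p : Int) (row : List Int) : Int :=
  match row with
  | [l, r, d] => if l ≤ p ∧ p ≤ r then (if d = 0 then (-1 : Int) else 1) else 0
  | _ => 0

def S (shifts : List (List Int)) (p : Int) : Int := (shifts.map (rowS p)).sum

-- content of A's difference array at index j
def rowPD (j : Int) (row : List Int) : Int :=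
  match row with
  | [l, r, d] => (if d = 0 then (-1 : Int) else 1) * ((if r + 1 = j then 1 else 0) - (if l = j then 1 else 0))
  | _ => 0

def PD (shifts : List (List Int)) (j : Int) : Int := (shifts.map (rowPD j)).sum

-- A's running 'diff' just before processing index t-1 (suffix sum of the difference array from t)
def rowDF (t : Int) (row : List Int) : Int :=
  match row with
  | [l, r, d] => (if d = 0 then (-1 : Int) else 1) * ((if t ≤ r + 1 then 1 else 0) - (if t ≤ l then 1 else 0))
  | _ => 0

def DF (shifts : List (List Int)) (t : Int) : Int := (shifts.map (rowDF t)).sum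

theorem DF_step (shifts : List (List Int)) (t : Int) :
    DF shifts t = DF shifts (t + 1) + PD shifts t := by
  induction shifts with
  | nil => simp [DF, PD]
  | cons row rest ih =>
      simp only [DF, PD, List.map_cons, List.sum_cons] at *
      have : rowDF t row = rowDF (t + 1) row + rowPD t row := by
        unfold rowDF rowPD
        match row with
        | [] => simp
        | [a] => simp
        | [a, b] => simp
        | [l, r, d] => dsimp only; split_ifs <;> ring_nf <;> omega
        | a :: b :: c :: e :: rest => simp
      omega

theorem DF_zero (shifts : List (List Int)) (n : Nat)
    (h : ∀ row ∈ shifts, rowOk n row = true) : DF shifts 0 = 0 := by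
  induction shifts with
  | nil => simp [DF]
  | cons row rest ih =>
      have hr := h row (by simp)
      have hrest : ∀ row ∈ rest, rowOk n row = true := fun r hrm => h r (by simp [hrm])
      simp only [DF, List.map_cons, List.sum_cons]
      have h0 : rowDF 0 row = 0 := by
        unfold rowOk at hr
        unfold rowDF
        match row with
        | [l, r, d] =>
            simp only [decide_eq_true_eq] at hr
            dsimp only; split_ifs <;> ring_nf <;> omega
        | [] => simp at hr
        | [a] => simp at hr
        | [a, b] => simp at hr
        | a :: b :: c :: e :: rest => simp at hr
      have := ih hrest
      simp only [DF] at this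
      omega

theorem DF_top (shifts : List (List Int)) (n : Nat)
    (h : ∀ row ∈ shifts, rowOk n row = true) : DF shifts ((n : Int) + 1) = 0 := by
  induction shifts with
  | nil => simp [DF]
  | cons row rest ih =>
      have hr := h row (by simp)
      have hrest : ∀ row ∈ rest, rowOk n row = true := fun r hrm => h r (by simp [hrm])
      simp only [DF, List.map_cons, List.sum_cons]
      have h0 : rowDF ((n : Int) + 1) row = 0 := by
        unfold rowOk at hr
        unfold rowDF
        match row with
        | [l, r, d] =>
            simp only [decide_eq_true_eq] at hr
            dsimp only; split_ifs <;> ring_nf <;> omega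
        | [] => simp at hr
        | [a] => simp at hr
        | [a, b] => simp at hr
        | a :: b :: c :: e :: rest => simp at hr
      have := ih hrest
      simp only [DF] at this
      omega

theorem DF_eq_S (shifts : List (List Int)) (n : Nat) (p : Int)
    (h : ∀ row ∈ shifts, rowOk n row = true) : DF shifts (p + 1) = S shifts p := by
  induction shifts with
  | nil => simp [DF, S]
  | cons row rest ih =>
      have hr := h row (by simp)
      have hrest : ∀ row ∈ rest, rowOk n row = true := fun r hrm => h r (by simp [hrm])
      simp only [DF, S, List.map_cons, List.sum_cons]
      have h0 : rowDF (p + 1) row = rowS p row := by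
        unfold rowOk at hr
        unfold rowDF rowS
        match row with
        | [l, r, d] =>
            simp only [decide_eq_true_eq] at hr
            dsimp only; split_ifs <;> ring_nf <;> omega
        | [] => simp at hr
        | [a] => simp at hr
        | [a, b] => simp at hr
        | a :: b :: c :: e :: rest => simp at hr
      have := ih hrest
      simp only [DF, S] at this
      omega

-- bridge lemmas between Python indexing and Lean's getD on Nat indices
theorem pyGetD_toNat (xs : List Int) (i : Int) (d : Int) (hi : 0 ≤ i) :
    PySem.List.pyGetD xs i d = xs.getD i.toNat d := by
  rw [show i = ((i.toNat : Nat) : Int) by omega, PySem.List.pyGetD_natCast, Int.toNat_natCast]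

theorem pyGetD_pySetD_int (xs : List Int) (i m : Int) (v d : Int)
    (hi : 0 ≤ i) (hlt : i < (xs.length : Int)) (hm : 0 ≤ m) :
    PySem.List.pyGetD (PySem.List.pySetD xs i v) m d = if m = i then v else PySem.List.pyGetD xs m d := by
  rw [show i = ((i.toNat : Nat) : Int) by omega, show m = ((m.toNat : Nat) : Int) by omega,
    PySem.List.pyGetD_pySetD_natCast xs i.toNat m.toNat v d (by omega)]
  split_ifs <;> first | rfl | omega

theorem getD_set_int (xs : List Int) (k j : Nat) (v : Int) :
    (xs.set k v).getD j 0 = if k = j ∧ j < xs.length then v else xs.getD j 0 := by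
  rw [List.getD_eq_getElem?_getD, List.getD_eq_getElem?_getD, List.getElem?_set]
  split_ifs <;> simp_all

theorem pySetD_neg_one (xs : List Int) (v : Int) (h : xs ≠ []) :
    PySem.List.pySetD xs (-1) v = xs.set (xs.length - 1) v := by
  have hl : 0 < xs.length := List.length_pos_iff.mpr h
  simp only [PySem.List.pySetD, PySem.List.pySet?, PySem.List.pyIdx?]
  split_ifs <;> simp_all

theorem pyGetD_neg_one_getD (xs : List Int) (d : Int) (h : xs ≠ []) :
    PySem.List.pyGetD xs (-1) d = xs.getD (xs.length - 1) d := by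
  have hl : 0 < xs.length := List.length_pos_iff.mpr h
  rw [PySem.List.pyGetD_neg_one xs d h, List.getD_eq_getElem xs d (by omega),
    List.getLast_eq_getElem]

-- one step of A's first loop, elementwise
theorem aStep_getD (n : Nat) (pd : List Int) (hlen : pd.length = n + 1)
    (row : List Int) (hr : rowOk n row = true) :
    (aStep pd row).length = n + 1 ∧
    ∀ j : Int, 0 ≤ j → PySem.List.pyGetD (aStep pd row) j 0 = PySem.List.pyGetD pd j 0 + rowPD j row := by
  match row with
  | [] => simp [rowOk] at hr
  | [a] => simp [rowOk] at hr
  | [a, b] => simp [rowOk] at hr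
  | a :: b :: c :: e :: rest => simp [rowOk] at hr
  | [l, r, d] =>
    simp only [rowOk, decide_eq_true_eq] at hr
    obtain ⟨h0l, hlr, hrn⟩ := hr
    have hst : (if d = 0 then (1 : Int) else -1) = -(if d = 0 then (-1 : Int) else 1) := by
      split_ifs <;> ring
    constructor
    · simp [aStep, PySem.List.length_pySetD, hlen]
    · intro j hj
      have hlen1 : (PySem.List.pySetD pd (r + 1)
          (PySem.List.pyGetD pd (r + 1) 0 + (if d = 0 then (-1 : Int) else 1))).length = n + 1 := by
        simp [PySem.List.length_pySetD, hlen]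
      simp only [aStep]
      rw [pyGetD_pySetD_int _ l j _ 0 h0l (by rw [hlen1]; push_cast; omega) hj,
        pyGetD_pySetD_int pd (r+1) j _ 0 (by omega) (by rw [hlen]; push_cast; omega) hj,
        pyGetD_pySetD_int pd (r+1) l _ 0 (by omega) (by rw [hlen]; push_cast; omega) h0l]
      unfold rowPD
      dsimp only
      by_cases hjl : j = l
      · subst hjl; split_ifs <;> ring_nf <;> omega
      · by_cases hjr : j = r + 1
        · subst hjr; split_ifs <;> ring_nf <;> omega
        · split_ifs <;> ring_nf <;> omega

-- characterization of A's first loop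
theorem pd_char (n : Nat) (shifts : List (List Int)) :
    ∀ pd : List Int, pd.length = n + 1 → (∀ row ∈ shifts, rowOk n row = true) →
    (shifts.foldl aStep pd).length = n + 1 ∧
    ∀ j : Int, 0 ≤ j → PySem.List.pyGetD (shifts.foldl aStep pd) j 0 = PySem.List.pyGetD pd j 0 + PD shifts j := by
  induction shifts with
  | nil => intro pd hlen _; simpa [PD] using hlen
  | cons row rest ih =>
      intro pd hlen h
      have hr := h row (by simp)
      have hrest : ∀ row ∈ rest, rowOk n row = true := fun r hrm => h r (by simp [hrm])
      obtain ⟨hlen1, hstep⟩ := aStep_getD n pd hlen row hr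
      obtain ⟨hlen2, hfold⟩ := ih (aStep pd row) hlen1 hrest
      refine ⟨by simpa using hlen2, fun j hj => ?_⟩
      simp only [List.foldl_cons]
      rw [hfold j hj, hstep j hj]
      simp only [PD, List.map_cons, List.sum_cons]
      ring

-- A's second loop: the invariant of the right-to-left suffix sweep
theorem aLoop2_spec (shifts : List (List Int)) (n : Nat)
    (h : ∀ row ∈ shifts, rowOk n row = true) (hn : 0 < n)
    (pd : List Int)
    (hpd : ∀ j : Int, 0 ≤ j → PySem.List.pyGetD pd j 0 = PD shifts j)
    (base : Nat → Int) :
    ∀ (t : Nat), t ≤ n + 1 → ∀ (diff : Int) (res : List Int), res.length = n →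
      diff = DF shifts (t : Int) →
      (∀ p : Nat, p < n → res.getD p 0 = if t ≤ p + 1 then (base p + DF shifts ((p : Int) + 1)) % 26 else base p) →
      (aLoop2 pd t diff res).2.length = n ∧
      ∀ p : Nat, p < n → (aLoop2 pd t diff res).2.getD p 0 = (base p + DF shifts ((p : Int) + 1)) % 26 := by
  intro t
  induction t with
  | zero =>
      intro _ diff res hlen _ hres
      refine ⟨by simpa [aLoop2] using hlen, fun p hp => ?_⟩
      simpa [aLoop2] using (hres p hp).trans (by simp)
  | succ t ih =>
      intro ht diff res hlen hdiff hres
      simp only [aLoop2]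
      have hdiff' : diff + PySem.List.pyGetD pd (t : Int) 0 = DF shifts (t : Int) := by
        rw [hdiff, hpd (t : Int) (by positivity)]
        have := DF_step shifts (t : Int)
        push_cast
        omega
      rcases Nat.eq_zero_or_pos t with h0 | hpos
      · -- Python index i = 0 : writes res[-1], i.e. the last cell, with diff = 0
        subst h0
        have hne : res ≠ [] := by intro hc; rw [hc] at hlen; simp at hlen; omega
        have hd0 : diff + PySem.List.pyGetD pd ((0 : Nat) : Int) 0 = 0 := by
          rw [hdiff']; exact_mod_cast DF_zero shifts n h
        rw [show (((0 : Nat) : Int) - 1) = (-1 : Int) by norm_num]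
        rw [pyGetD_neg_one_getD res 0 hne, pySetD_neg_one res _ hne, hd0]
        have hlast : res.getD (res.length - 1) 0 = (base (n-1) + DF shifts (((n-1 : Nat) : Int) + 1)) % 26 := by
          rw [hlen]
          have := hres (n-1) (by omega)
          rw [if_pos (by omega)] at this
          exact this
        rw [hlast]
        have hv : (0 + (base (n-1) + DF shifts (((n-1 : Nat) : Int) + 1)) % 26) % 26
            = (base (n-1) + DF shifts (((n-1 : Nat) : Int) + 1)) % 26 := by
          rw [zero_add, Int.emod_emod_of_dvd _ dvd_rfl]
        rw [PySem.Int.mod_eq_emod_of_pos (by norm_num), hv]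
        apply ih (by omega) _ _ (by simpa using hlen)
        · exact_mod_cast (DF_zero shifts n h).symm
        · intro p hp
          rw [getD_set_int]
          split_ifs with hc h2 h3
          · rw [show p = n - 1 by omega]
          · omega
          · have := hres p hp
            rw [if_pos (by omega)] at this
            exact this
          · omega
      · -- Python index i = t ≥ 1 : writes res[t-1]
        have he : ((t : Int) - 1) = (((t - 1 : Nat)) : Int) := by omega
        rw [he, PySem.List.pyGetD_natCast, PySem.List.pyGetD_natCast res (t-1) 0,
          PySem.List.pySetD_natCast]
        have hget : res.getD (t-1) 0 = base (t-1) := by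
          have := hres (t-1) (by omega)
          rw [if_neg (by omega)] at this
          exact this
        rw [hget, PySem.Int.mod_eq_emod_of_pos (by norm_num)]
        rw [PySem.List.pyGetD_natCast] at hdiff'
        apply ih (by omega) _ _ (by simpa using hlen) hdiff'
        intro p hp
        rw [getD_set_int]
        split_ifs with hc h2 h3
        · obtain ⟨hc1, _⟩ := hc
          subst hc1
          rw [hdiff']
          have he2 : ((t : Int)) = (((t - 1 : Nat) : Int) + 1) := by omega
          rw [he2]
          omega
        · omega
        · have := hres p hp
          rw [if_pos (by omega)] at this
          exact this
        · have := hres p hp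
          rw [if_neg (by omega)] at this
          exact this

-- B's inner loop: apply the shift to every index of range(a, b)
theorem bInner_aux (step : Int) (b : Int) :
    ∀ (m : Nat) (a : Int) (codes : List Int), 0 ≤ a → b ≤ (codes.length : Int) → (b - a).toNat = m →
      (((PySem.List.pyRange a b 1).foldl (fun codes n =>
          PySem.List.pySetD codes n (PySem.Int.mod (PySem.List.pyGetD codes n 0 + step) 26)) codes).length = codes.length ∧
       ∀ p : Nat, p < codes.length →
        ((PySem.List.pyRange a b 1).foldl (fun codes n =>
          PySem.List.pySetD codes n (PySem.Int.mod (PySem.List.pyGetD codes n 0 + step) 26)) codes).getD p 0 =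
          if a ≤ (p : Int) ∧ (p : Int) < b then (codes.getD p 0 + step) % 26 else codes.getD p 0) := by
  intro m
  induction m with
  | zero =>
      intro a codes ha hb hm
      rw [PySem.List.pyRange_one_eq_nil (by omega)]
      exact ⟨rfl, fun p hp => by rw [if_neg (by omega)]; rfl⟩
  | succ m ih =>
      intro a codes ha hb hm
      rw [PySem.List.pyRange_one_cons (by omega)]
      simp only [List.foldl_cons]
      have hset : PySem.List.pySetD codes a (PySem.Int.mod (PySem.List.pyGetD codes a 0 + step) 26)
          = codes.set a.toNat ((codes.getD a.toNat 0 + step) % 26) := by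
        rw [PySem.List.pySetD_of_nonneg _ _ ha, pyGetD_toNat codes a 0 ha,
          PySem.Int.mod_eq_emod_of_pos (by norm_num)]
      rw [hset]
      obtain ⟨ihlen, ihget⟩ := ih (a + 1) (codes.set a.toNat ((codes.getD a.toNat 0 + step) % 26))
        (by omega) (by simpa using hb) (by omega)
      refine ⟨by simpa using ihlen, fun p hp => ?_⟩
      rw [ihget p (by simpa using hp), getD_set_int]
      have hab : a < b := by omega
      by_cases hpa : (p : Int) = a
      · rw [if_neg (by omega), if_pos (by omega), if_pos (by constructor <;> omega),
          show a.toNat = p by omega]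
      · by_cases hin : a + 1 ≤ (p : Int) ∧ (p : Int) < b
        · rw [if_pos hin, if_neg (by omega), if_pos (by omega)]
        · rw [if_neg hin, if_neg (by omega), if_neg (by omega)]

-- B's outer loop: the net shift accumulates mod 26
theorem b_loop (n : Nat) :
    ∀ (shifts : List (List Int)) (codes : List Int), codes.length = n →
    (∀ row ∈ shifts, rowOk n row = true) →
    (∀ p : Nat, p < n → 0 ≤ codes.getD p 0 ∧ codes.getD p 0 < 26) →
    (shifts.foldl bStep codes).length = n ∧
    ∀ p : Nat, p < n → (shifts.foldl bStep codes).getD p 0 = (codes.getD p 0 + S shifts (p : Int)) % 26 := by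
  intro shifts
  induction shifts with
  | nil =>
      intro codes hlen _ hbnd
      refine ⟨hlen, fun p hp => ?_⟩
      simp only [List.foldl_nil, S, List.map_nil, List.sum_nil, add_zero]
      exact (Int.emod_eq_of_lt (hbnd p hp).1 (hbnd p hp).2).symm
  | cons row rest ih =>
      intro codes hlen h hbnd
      have hr := h row (by simp)
      have hrest : ∀ row ∈ rest, rowOk n row = true := fun r hrm => h r (by simp [hrm])
      match row with
      | [] => simp [rowOk] at hr
      | [a] => simp [rowOk] at hr
      | [a, b] => simp [rowOk] at hr
      | a :: b :: c :: e :: tl => simp [rowOk] at hr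
      | [l, r, d] =>
        simp only [rowOk, decide_eq_true_eq] at hr
        obtain ⟨h0l, hlr, hrn⟩ := hr
        obtain ⟨slen, sget⟩ := bInner_aux (if d = 0 then (-1 : Int) else 1) (r + 1)
          ((r + 1 - l).toNat) l codes h0l (by omega) rfl
        have hstep : bStep codes [l, r, d] =
            (PySem.List.pyRange l (r + 1) 1).foldl (fun codes n =>
              PySem.List.pySetD codes n (PySem.Int.mod (PySem.List.pyGetD codes n 0 + (if d = 0 then (-1 : Int) else 1)) 26)) codes := rfl
        have hbnd' : ∀ p : Nat, p < n → 0 ≤ (bStep codes [l, r, d]).getD p 0 ∧ (bStep codes [l, r, d]).getD p 0 < 26 := by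
          intro p hp
          rw [hstep, sget p (by omega)]
          by_cases hc : l ≤ (p : Int) ∧ (p : Int) < r + 1
          · rw [if_pos hc]
            exact ⟨Int.emod_nonneg _ (by norm_num), Int.emod_lt_of_pos _ (by norm_num)⟩
          · rw [if_neg hc]
            exact hbnd p hp
        obtain ⟨flen, fget⟩ := ih (bStep codes [l, r, d]) (by rw [hstep, slen, hlen]) hrest hbnd'
        refine ⟨by simpa using flen, fun p hp => ?_⟩
        simp only [List.foldl_cons]
        rw [fget p hp, hstep, sget p (by omega)]
        simp only [S, List.map_cons, List.sum_cons]
        unfold rowS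
        dsimp only
        by_cases hc : l ≤ (p : Int) ∧ (p : Int) < r + 1
        · rw [if_pos hc, if_pos (show l ≤ (p : Int) ∧ (p : Int) ≤ r by omega),
            Int.emod_add_emod, add_assoc]
        · rw [if_neg hc, if_neg (show ¬(l ≤ (p : Int) ∧ (p : Int) ≤ r) by omega), zero_add]

-- ===== VERDICT (by name: the statement is the Claim_ definition above) =====
theorem shiftingLetters_spec : Claim_equal_shiftingLetters := by
  intro s shifts _ hpre
  obtain ⟨hne, hrows⟩ := hpre
  have hn0 : 0 < s.toList.length := List.length_pos_iff.mpr hne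
  have hA : shiftingLetters s shifts = String.ofList
      ((aLoop2 (shifts.foldl aStep (List.replicate (s.toList.length + 1) 0)) (s.toList.length + 1) 0
        (s.toList.map (fun c => (c.toNat : Int) - 97))).2.map (fun x => Char.ofNat (97 + x).toNat)) := rfl
  have hB : shiftingLetters_alt s shifts = String.ofList
      ((shifts.foldl bStep (s.toList.map (fun c => PySem.Int.mod ((c.toNat : Int) - 97) 26))).map
        (fun x => Char.ofNat (97 + x).toNat)) := rfl
  unfold Spec_shiftingLetters
  rw [hA, hB]
  -- the A side
  obtain ⟨hpdlen, hpdget⟩ := pd_char s.toList.length shifts (List.replicate (s.toList.length + 1) 0) (by simp) hrows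
  have hpd : ∀ j : Int, 0 ≤ j →
      PySem.List.pyGetD (shifts.foldl aStep (List.replicate (s.toList.length + 1) 0)) j 0 = PD shifts j := by
    intro j hj
    rw [hpdget j hj, pyGetD_toNat _ j 0 hj]
    simp [List.getD]
  have hres0 : ∀ p : Nat, p < s.toList.length →
      (s.toList.map (fun c => (c.toNat : Int) - 97)).getD p 0
        = ((s.toList.getD p 'a').toNat : Int) - 97 := by
    intro p hp
    rw [List.getD_eq_getElem _ _ (by simpa using hp), List.getElem_map,
      List.getD_eq_getElem _ _ hp]
  obtain ⟨halen, haget⟩ := aLoop2_spec shifts s.toList.length hrows hn0 _ hpd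
    (fun p => ((s.toList.getD p 'a').toNat : Int) - 97) (s.toList.length + 1) (by omega) 0
    (s.toList.map (fun c => (c.toNat : Int) - 97)) (by simp)
    (by exact_mod_cast (DF_top shifts s.toList.length hrows).symm)
    (fun p hp => by rw [if_neg (by omega)]; exact hres0 p hp)
  -- the B side
  have hc0 : ∀ p : Nat, p < s.toList.length →
      (s.toList.map (fun c => PySem.Int.mod ((c.toNat : Int) - 97) 26)).getD p 0
        = (((s.toList.getD p 'a').toNat : Int) - 97) % 26 := by
    intro p hp
    rw [List.getD_eq_getElem _ _ (by simpa using hp), List.getElem_map,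
      PySem.Int.mod_eq_emod_of_pos (by norm_num), List.getD_eq_getElem _ _ hp]
  obtain ⟨hblen, hbget⟩ := b_loop s.toList.length shifts
    (s.toList.map (fun c => PySem.Int.mod ((c.toNat : Int) - 97) 26)) (by simp) hrows
    (fun p hp => by
      rw [hc0 p hp]
      exact ⟨Int.emod_nonneg _ (by norm_num), Int.emod_lt_of_pos _ (by norm_num)⟩)
  -- the two final integer lists agree elementwise
  have hlists : (aLoop2 (shifts.foldl aStep (List.replicate (s.toList.length + 1) 0)) (s.toList.length + 1) 0
        (s.toList.map (fun c => (c.toNat : Int) - 97))).2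
      = shifts.foldl bStep (s.toList.map (fun c => PySem.Int.mod ((c.toNat : Int) - 97) 26)) := by
    apply List.ext_getElem (by rw [halen, hblen])
    intro i h1 h2
    rw [← List.getD_eq_getElem _ 0 h1, ← List.getD_eq_getElem _ 0 h2]
    have hi : i < s.toList.length := by rw [← halen]; exact h1
    rw [haget i hi, hbget i hi, hc0 i hi, Int.emod_add_emod,
      DF_eq_S shifts s.toList.length (i : Int) hrows]
  rw [hlists]
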